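-- pv_equiv track=rewrite | github.com/sanjieyu/python_sample | what_is_wrong_with_the_family.py | is_family
-- ===== SOURCE A (Python) =====
-- def is_family(tree: list[list[str]]) -> bool:
--     family = dict()
--     for member in tree:
--         if (member[1] in family):
--             if family[member[1]] != "":
--                 return False
--             else: family[member[1]] = member[0]
--         else: family[member[1]] = member[0]
--         if (member[0] not in family):
--             family[member[0]] = ""
--     num = [1 if value == "" else 0 for value in family.values()].count(1)
--     if num != 1:
--         return False
--     for member in family:
--         path = set()
--         current = member
--         path.add(current)
--         while family[current] != "":
--             if family[current] not in path:
--                 path.add(family[current])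
--                 current = family[current]
--             else:
--                 return False
--     return True
-- ===== SOURCE B (Python) =====
-- def is_family(tree):
--     parent = {}
--     nodes = set()
--     for member in tree:
--         p, c = member[0], member[1]
--         if c in parent:
--             return False
--         parent[c] = p
--         nodes.add(p)
--         nodes.add(c)
--     if sum(1 for n in nodes if n not in parent) != 1:
--         return False
--     visited = set()
--     for n in parent:
--         path = set()
--         cur = n
--         while cur not in visited:
--             if cur in path:
--                 return False
--             path.add(cur)
--             if cur not in parent:
--                 break
--             cur = parent[cur]
--         visited |= path
--     return True
-- ===== Notes on version B (the rewrite author's own statement) =====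
-- stated objective: alternative
-- what changed: B builds one plain child-to-parent dict with an early duplicate-child exit and checks for cycles with a single globally memoized walk (a visited set shared across all start nodes), instead of A's sentinel-encoded dict plus an independent full parent-chain walk restarted from every node.
-- outside the precondition, e.g. on is_family([['', 'a']]): A returns False, B returns True
import Mathlib
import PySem

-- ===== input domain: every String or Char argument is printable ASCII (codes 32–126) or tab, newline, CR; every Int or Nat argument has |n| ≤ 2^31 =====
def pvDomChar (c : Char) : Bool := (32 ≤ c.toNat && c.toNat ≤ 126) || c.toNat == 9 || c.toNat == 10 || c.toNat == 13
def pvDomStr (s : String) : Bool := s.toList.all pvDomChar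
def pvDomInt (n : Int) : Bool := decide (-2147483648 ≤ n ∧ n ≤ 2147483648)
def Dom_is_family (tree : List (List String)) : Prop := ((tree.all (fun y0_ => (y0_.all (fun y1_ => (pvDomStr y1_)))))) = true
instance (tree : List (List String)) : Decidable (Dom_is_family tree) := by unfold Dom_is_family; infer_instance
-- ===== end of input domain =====

-- B replaces A's per-node parent-chain walks by a globally memoized walk (a visited set shared across start
-- nodes) over a plain child→parent dict built in one pass with an early duplicate-child exit; same return
-- value, different algorithm.

-- ===== PORT A =====
-- Python A, step for step.  member[0]/member[1] on a member with < 2 entries raises IndexError (excluded by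
-- Pre_); the `| _ => none` arm stands for that exception.  family[current] in the while loop always has its
-- key present (every value stored is also inserted as a key), so getD is exact there.
-- `if member[0] not in family: family[member[0]] = ""`:
def famInsA (fam : PySem.Dict String String) (p c : String) : PySem.Dict String String :=
  let f1 := fam.insert c p
  if f1.contains p then f1 else f1.insert p ""

-- the first for-loop; `none` = `return False` (or IndexError on a short member, outside Pre_)
def famBuildA : List (List String) → PySem.Dict String String → Option (PySem.Dict String String)
  | [], fam => some fam
  | m :: rest, fam =>
    match m with
    | p :: c :: _ =>
      if fam.contains c then
        if !(fam.getD c "" == "") then none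
        else famBuildA rest (famInsA fam p c)
      else famBuildA rest (famInsA fam p c)
    | _ => none

-- the while loop; fuel = fam.size + 1 bounds its iterations (each one adds a fresh key to path), proved below
def famWalkA (fam : PySem.Dict String String) : Nat → String → PySem.Set String → Bool
  | 0, _, _ => false
  | fuel + 1, current, path =>
    if fam.getD current "" == "" then true
    else if PySem.Set.contains path (fam.getD current "") then false
    else famWalkA fam fuel (fam.getD current "") (PySem.Set.add path (fam.getD current ""))

-- `for member in family:` (keys, insertion order); path starts as {member}
def famLoopA (fam : PySem.Dict String String) : List String → Bool
  | [] => true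
  | k :: ks =>
    if famWalkA fam (fam.size + 1) k (PySem.Set.add PySem.Set.empty k) then famLoopA fam ks
    else false

def is_family (tree : List (List String)) : Bool :=
  match famBuildA tree PySem.Dict.empty with
  | none => false
  | some fam =>
    let num := ((fam.values.map (fun v => if v == "" then (1 : Nat) else 0)).count 1)
    if num ≠ 1 then false
    else famLoopA fam fam.keys

-- ===== PORT B =====
-- my Source B, step for step; `none` = `return False` (or IndexError on a short member, outside Pre_)
def famBuildB : List (List String) → PySem.Dict String String → PySem.Set String →
    Option (PySem.Dict String String × PySem.Set String)
  | [], par, nodes => some (par, nodes)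
  | m :: rest, par, nodes =>
    match m with
    | p :: c :: _ =>
      if par.contains c then none
      else famBuildB rest (par.insert c p) (PySem.Set.add (PySem.Set.add nodes p) c)
    | _ => none

-- the memoized while loop; returns the final path (`some`) or `none` for `return False`;
-- fuel = par.size + 2 bounds its iterations (each one adds a fresh key to path), proved below
def famWalkB (par : PySem.Dict String String) : Nat → String → PySem.Set String → PySem.Set String →
    Option (PySem.Set String)
  | 0, _, _, _ => none
  | fuel + 1, cur, visited, path =>
    if PySem.Set.contains visited cur then some path
    else if PySem.Set.contains path cur then none
    else
      match par.get? cur with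
      | none => some (PySem.Set.add path cur)
      | some p => famWalkB par fuel p visited (PySem.Set.add path cur)

-- `for n in parent:` with `visited |= path` after each walk
def famLoopB (par : PySem.Dict String String) : List String → PySem.Set String → Bool
  | [], _ => true
  | n :: ns, visited =>
    match famWalkB par (par.size + 2) n visited PySem.Set.empty with
    | none => false
    | some path => famLoopB par ns (PySem.Set.union visited path)

def is_family_alt (tree : List (List String)) : Bool :=
  match famBuildB tree PySem.Dict.empty PySem.Set.empty with
  | none => false
  | some (par, nodes) =>
    if (nodes.filter (fun n => !par.contains n)).length ≠ 1 then false
    else famLoopB par par.keys PySem.Set.empty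

-- ===== PRECONDITION & SPEC =====
-- Pre_ excludes members with fewer than 2 entries, on which A raises IndexError, and trees in which some
-- member's parent field (member[0]) is the empty string: A reserves "" internally as its no-parent sentinel,
-- so its root count and cycle walk on such trees are artefacts of that encoding — a corner no caller would
-- rely on (B simply treats "" as an ordinary name there).
def preMember (m : List String) : Bool :=
  match m with
  | p :: _ :: _ => !(p == "")
  | _ => false

def Pre_is_family (tree : List (List String)) : Prop := tree.all preMember = true
instance (tree : List (List String)) : Decidable (Pre_is_family tree) := by
  unfold Pre_is_family; infer_instance

def pvWitness_is_family : List (List String) := [["a", "b"], ["a", "c"], ["c", "d"]]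

def Spec_is_family (tree : List (List String)) (out : Bool) : Prop := out = is_family_alt tree
instance (tree : List (List String)) (out : Bool) : Decidable (Spec_is_family tree out) := by
  unfold Spec_is_family; infer_instance

-- ===== CLAIM (what is proved, stated in full; the proofs are below) =====
def Claim_equal_is_family : Prop := ∀ (tree : List (List String)), Dom_is_family tree → Pre_is_family tree → Spec_is_family tree (is_family tree)

-- ===== LEMMAS AND PROOFS =====

-- The parent-pointer step function: g par x = par.getD x "" (nonempty ⇔ x has a parent, inside Pre_).
def gstep (par : PySem.Dict String String) (x : String) : String := par.getD x ""

-- x's parent chain reaches a root (a name with no parent entry)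
def GoodN (par : PySem.Dict String String) (x : String) : Prop :=
  ∃ j, par.get? ((gstep par)^[j] x) = none

-- y lies on x's parent chain, every chain element strictly before y having a parent entry
def ReachN (par : PySem.Dict String String) (x y : String) : Prop :=
  ∃ t, (gstep par)^[t] x = y ∧ ∀ i < t, par.contains ((gstep par)^[i] x) = true

-- same, via at least one step
def SReachN (par : PySem.Dict String String) (x y : String) : Prop :=
  ∃ t, 0 < t ∧ (gstep par)^[t] x = y ∧ ∀ i < t, par.contains ((gstep par)^[i] x) = true

-- the first root on x's chain is at index j
def MinRoot (par : PySem.Dict String String) (x : String) (j : Nat) : Prop :=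
  par.get? ((gstep par)^[j] x) = none ∧ ∀ i < j, par.get? ((gstep par)^[i] x) ≠ none

-- invariant tying A's family dict to B's parent dict and node set
def DRel (fam par : PySem.Dict String String) (nodes : PySem.Set String) : Prop :=
  (∀ x, par.get? x = if fam.getD x "" = "" then none else some (fam.getD x "")) ∧
  (∀ x, x ∈ fam.keys ↔ x ∈ nodes) ∧ nodes.Nodup ∧ fam.keys.Nodup ∧ par.keys.Nodup

def ORel : Option (PySem.Dict String String) → Option (PySem.Dict String String × PySem.Set String) → Prop
  | none, none => True
  | some fam, some pn => DRel fam pn.1 pn.2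
  | _, _ => False


theorem drel_init : DRel PySem.Dict.empty PySem.Dict.empty PySem.Set.empty := by
  refine ⟨?_, ?_, ?_, ?_, ?_⟩ <;>
    simp [PySem.Dict.get?_empty, PySem.Dict.getD_empty, PySem.Dict.keys_empty, PySem.Set.empty]

theorem drel_step (fam par : PySem.Dict String String) (nodes : PySem.Set String) (p c : String)
    (hp : p ≠ "") (hrel : DRel fam par nodes) :
    DRel (famInsA fam p c) (par.insert c p) (PySem.Set.add (PySem.Set.add nodes p) c) := by
  obtain ⟨h1, h2, h3, h4, h5⟩ := hrel
  have hkeys2 : ∀ x, x ∈ (famInsA fam p c).keys ↔ x = c ∨ x = p ∨ x ∈ fam.keys := by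
    intro x
    unfold famInsA
    by_cases hcp : (fam.insert c p).contains p = true
    · simp only [if_pos hcp, PySem.Dict.mem_keys_insert]
      constructor
      · rintro (rfl | hx)
        · exact Or.inl rfl
        · exact Or.inr (Or.inr hx)
      · rintro (rfl | rfl | hx)
        · exact Or.inl rfl
        · rcases (PySem.Dict.mem_keys_insert _ _ _ _).1 ((PySem.Dict.contains_iff_mem_keys _ _).1 hcp) with h | h
          · exact Or.inl h
          · exact Or.inr h
        · exact Or.inr hx
    · simp only [if_neg hcp, PySem.Dict.mem_keys_insert]
      tauto
  refine ⟨?_, ?_, ?_, ?_, ?_⟩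
  · intro x
    rw [PySem.Dict.get?_insert]
    unfold famInsA
    by_cases hcp : (fam.insert c p).contains p = true
    · simp only [if_pos hcp, PySem.Dict.getD_insert]
      by_cases hxc : x = c
      · simp [hxc, hp]
      · simp only [if_neg hxc]
        exact h1 x
    · have hne : ¬ (p = c) ∧ fam.contains p = false := by
        rw [PySem.Dict.contains_insert] at hcp
        constructor
        · intro h; apply hcp; simp [h]
        · cases h : fam.contains p
          · rfl
          · exact absurd (by simp [h]) hcp
      simp only [if_neg hcp, PySem.Dict.getD_insert]
      by_cases hxp : x = p
      · have hxc : ¬ (x = c) := by rw [hxp]; exact hne.1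
        subst hxp
        simp only [if_neg hxc]
        have : fam.getD x "" = "" := PySem.Dict.getD_of_not_contains _ _ hne.2
        rw [h1 x, if_pos this]
        simp
      · simp only [if_neg hxp]
        by_cases hxc : x = c
        · simp [hxc, hp]
        · simp only [if_neg hxc]
          exact h1 x
  · intro x
    rw [hkeys2 x]
    simp only [PySem.Set.mem_add]
    rw [h2 x]
    tauto
  · exact PySem.Set.nodup_add _ _ (PySem.Set.nodup_add _ _ h3)
  · unfold famInsA
    by_cases hcp : (fam.insert c p).contains p = true
    · simpa [hcp] using PySem.Dict.nodup_keys_insert _ _ _ h4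
    · simpa [hcp] using PySem.Dict.nodup_keys_insert _ _ _ (PySem.Dict.nodup_keys_insert _ _ _ h4)
  · exact PySem.Dict.nodup_keys_insert _ _ _ h5

theorem build_rel (tree : List (List String)) : ∀ (fam par : PySem.Dict String String)
    (nodes : PySem.Set String), DRel fam par nodes → (∀ m ∈ tree, preMember m = true) →
    ORel (famBuildA tree fam) (famBuildB tree par nodes) := by
  induction tree with
  | nil => intro fam par nodes hrel _; exact hrel
  | cons m rest ih =>
    intro fam par nodes hrel hpre
    have hm := hpre m (List.mem_cons_self)
    match m with
    | [] => simp [preMember] at hm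
    | [_] => simp [preMember] at hm
    | p :: c :: tl =>
      have hp : ¬ (p = "") := by simpa [preMember] using hm
      have hrest : ∀ m ∈ rest, preMember m = true := fun m hmem => hpre m (List.mem_cons_of_mem _ hmem)
      have h1 := hrel.1
      by_cases hc : fam.getD c "" = ""
      · have hpc : par.contains c = false := by
          rw [PySem.Dict.contains_eq_isSome_get?, h1 c, if_pos hc]; rfl
        have hnext := drel_step fam par nodes p c hp hrel
        have hrec := ih _ _ _ hnext hrest
        simp only [famBuildA, famBuildB, hpc, hc, Bool.false_eq_true, if_false]
        cases hfc : fam.contains c <;> simp [hrec]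
      · have hfc : fam.contains c = true := by
          cases h : fam.contains c
          · exact absurd (PySem.Dict.getD_of_not_contains _ _ h) hc
          · rfl
        have hpc : par.contains c = true := by
          rw [PySem.Dict.contains_eq_isSome_get?, h1 c, if_neg hc]; rfl
        simp [famBuildA, famBuildB, hpc, hfc, hc, ORel]


-- ---- chain lemmas ----

theorem dict_size_eq_keys_length (d : PySem.Dict String String) : d.size = d.keys.length := by
  simp [PySem.Dict.size, PySem.Dict.keys]

theorem contains_of_get?_ne_none (d : PySem.Dict String String) (k : String)
    (h : d.get? k ≠ none) : d.contains k = true := by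
  rw [PySem.Dict.contains_eq_isSome_get?]
  cases hk : d.get? k
  · exact absurd hk h
  · rfl

theorem good_of_iter (par : PySem.Dict String String) (x : String) (t : Nat)
    (h : GoodN par ((gstep par)^[t] x)) : GoodN par x := by
  obtain ⟨j, hj⟩ := h
  exact ⟨j + t, by rw [Function.iterate_add_apply]; exact hj⟩

theorem good_step (par : PySem.Dict String String) (x p : String)
    (hx : par.get? x = some p) (h : GoodN par p) : GoodN par x := by
  apply good_of_iter par x 1
  have : (gstep par)^[1] x = p := by
    simp [gstep, PySem.Dict.getD_of_get?_eq_some _ _ hx]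
  rw [this]; exact h

theorem not_good_of_cycle (par : PySem.Dict String String) (x : String) (t : Nat) (ht : 0 < t)
    (hc : (gstep par)^[t] x = x)
    (hproper : ∀ i < t, par.contains ((gstep par)^[i] x) = true) : ¬ GoodN par x := by
  rintro ⟨j, hj⟩
  have key : ∀ n, (gstep par)^[n] x = (gstep par)^[n % t] x := by
    intro n
    induction n using Nat.strong_induction_on with
    | _ n ih =>
      by_cases h : n < t
      · rw [Nat.mod_eq_of_lt h]
      · replace h : t ≤ n := by omega
        have h1 : n = (n - t) + t := (Nat.sub_add_cancel h).symm
        calc (gstep par)^[n] x = (gstep par)^[(n - t) + t] x := by rw [← h1]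
          _ = (gstep par)^[n - t] ((gstep par)^[t] x) := Function.iterate_add_apply _ _ _ _
          _ = (gstep par)^[n - t] x := by rw [hc]
          _ = (gstep par)^[(n - t) % t] x := ih (n - t) (by omega)
          _ = (gstep par)^[n % t] x := by rw [← Nat.mod_eq_sub_mod h]
  have hcont := hproper (j % t) (Nat.mod_lt _ ht)
  rw [← key j, PySem.Dict.contains_eq_isSome_get?, hj] at hcont
  simp at hcont

theorem reach_refl (par : PySem.Dict String String) (x : String) : ReachN par x x :=
  ⟨0, rfl, fun i hi => absurd hi (by omega)⟩

theorem reach_of_sreach (par : PySem.Dict String String) {x y : String}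
    (h : SReachN par x y) : ReachN par x y := by
  obtain ⟨t, _, h1, h2⟩ := h; exact ⟨t, h1, h2⟩

theorem reach_snoc (par : PySem.Dict String String) {q x p : String}
    (hr : ReachN par q x) (hx : par.get? x = some p) : ReachN par q p := by
  obtain ⟨t, h1, h2⟩ := hr
  refine ⟨t + 1, ?_, ?_⟩
  · rw [Function.iterate_succ_apply', h1]
    simp [gstep, PySem.Dict.getD_of_get?_eq_some _ _ hx]
  · intro i hi
    by_cases hit : i < t
    · exact h2 i hit
    · have : i = t := by omega
      subst this
      rw [h1]
      exact contains_of_get?_ne_none _ _ (by rw [hx]; simp)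

theorem sreach_snoc (par : PySem.Dict String String) {q x p : String}
    (hr : SReachN par q x) (hx : par.get? x = some p) : SReachN par q p := by
  obtain ⟨t, ht, h1, h2⟩ := hr
  refine ⟨t + 1, by omega, ?_, ?_⟩
  · rw [Function.iterate_succ_apply', h1]
    simp [gstep, PySem.Dict.getD_of_get?_eq_some _ _ hx]
  · intro i hi
    by_cases hit : i < t
    · exact h2 i hit
    · have : i = t := by omega
      subst this
      rw [h1]
      exact contains_of_get?_ne_none _ _ (by rw [hx]; simp)

theorem sreach_step (par : PySem.Dict String String) {x p : String}
    (hx : par.get? x = some p) : SReachN par x p := by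
  refine ⟨1, by omega, ?_, ?_⟩
  · simp [gstep, PySem.Dict.getD_of_get?_eq_some _ _ hx]
  · intro i hi
    have : i = 0 := by omega
    subst this
    simp only [Function.iterate_zero_apply]
    exact contains_of_get?_ne_none _ _ (by rw [hx]; simp)

theorem good_of_reach (par : PySem.Dict String String) {q x : String}
    (h : ReachN par q x) (hg : GoodN par x) : GoodN par q := by
  obtain ⟨t, h1, _⟩ := h
  exact good_of_iter par q t (by rw [h1]; exact hg)

theorem good_of_sreach (par : PySem.Dict String String) {q x : String}
    (h : SReachN par q x) (hg : GoodN par x) : GoodN par q :=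
  good_of_reach par (reach_of_sreach par h) hg

theorem not_good_of_sreach_self (par : PySem.Dict String String) {x : String}
    (h : SReachN par x x) : ¬ GoodN par x := by
  obtain ⟨t, ht, hc, hp⟩ := h
  exact not_good_of_cycle par x t ht hc hp

theorem sreach_trans_reach (par : PySem.Dict String String) {x y z : String}
    (h1 : SReachN par x y) (h2 : ReachN par y z) : SReachN par x z := by
  obtain ⟨t1, ht1, e1, p1⟩ := h1
  obtain ⟨t2, e2, p2⟩ := h2
  refine ⟨t2 + t1, by omega, ?_, ?_⟩
  · rw [Function.iterate_add_apply, e1, e2]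
  · intro i hi
    by_cases hit : i < t1
    · exact p1 i hit
    · have heqi : (gstep par)^[i] x = (gstep par)^[i - t1] y := by
        conv_lhs => rw [show i = (i - t1) + t1 from by omega]
        rw [Function.iterate_add_apply, e1]
      rw [heqi]
      exact p2 (i - t1) (by omega)

theorem cycle_from_step (par : PySem.Dict String String) {x p : String}
    (hx : par.get? x = some p) (hr : ReachN par p x) : ¬ GoodN par x :=
  not_good_of_sreach_self par (sreach_trans_reach par (sreach_step par hx) hr)

theorem minroot_good (par : PySem.Dict String String) {x : String} {j : Nat}
    (h : MinRoot par x j) : GoodN par x := ⟨j, h.1⟩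

theorem minroot_of_good (par : PySem.Dict String String) (x : String)
    (h : GoodN par x) : ∃ j, MinRoot par x j := by
  obtain ⟨j, hj⟩ := h
  have hex : ∃ j, par.get? ((gstep par)^[j] x) = none := ⟨j, hj⟩
  exact ⟨Nat.find hex, Nat.find_spec hex, fun i hi => Nat.find_min hex hi⟩

theorem minroot_contains (par : PySem.Dict String String) {x : String} {j : Nat}
    (h : MinRoot par x j) : ∀ i < j, par.contains ((gstep par)^[i] x) = true :=
  fun i hi => contains_of_get?_ne_none _ _ (h.2 i hi)

theorem minroot_shift (par : PySem.Dict String String) {x p : String} {j : Nat}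
    (h : MinRoot par x (j + 1)) (hx : par.get? x = some p) : MinRoot par p j := by
  have hstep : ∀ i, (gstep par)^[i] p = (gstep par)^[i + 1] x := by
    intro i
    rw [Function.iterate_succ_apply]
    congr 1
    simp [gstep, PySem.Dict.getD_of_get?_eq_some _ _ hx]
  exact ⟨by rw [hstep]; exact h.1, fun i hi => by rw [hstep]; exact h.2 (i + 1) (by omega)⟩

theorem minroot_le (par : PySem.Dict String String) (x : String) (j : Nat)
    (h : MinRoot par x j) : j ≤ par.keys.length := by
  have haux : ∀ i i', i < i' → i' < j → (gstep par)^[i] x ≠ (gstep par)^[i'] x := by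
    intro i i' hii hij heq
    have hjsplit : j = (j - i') + i' := by omega
    have : (gstep par)^[j] x = (gstep par)^[(j - i') + i] x := by
      calc (gstep par)^[j] x = (gstep par)^[(j - i') + i'] x := by rw [← hjsplit]
        _ = (gstep par)^[j - i'] ((gstep par)^[i'] x) := Function.iterate_add_apply _ _ _ _
        _ = (gstep par)^[j - i'] ((gstep par)^[i] x) := by rw [← heq]
        _ = (gstep par)^[(j - i') + i] x := (Function.iterate_add_apply _ _ _ _).symm
    exact h.2 ((j - i') + i) (by omega) (by rw [← this]; exact h.1)
  have hnodL : ((List.range j).map (fun i => (gstep par)^[i] x)).Nodup := by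
    apply List.Nodup.map_on ?_ (List.nodup_range)
    intro i hi i' hi' heq
    rw [List.mem_range] at hi hi'
    rcases Nat.lt_trichotomy i i' with h' | h' | h'
    · exact absurd heq (haux i i' h' hi')
    · exact h'
    · exact absurd heq.symm (haux i' i h' hi)
  have hsub : ((List.range j).map (fun i => (gstep par)^[i] x)) ⊆ par.keys := by
    intro y hy
    rw [List.mem_map] at hy
    obtain ⟨i, hi, rfl⟩ := hy
    rw [List.mem_range] at hi
    exact (PySem.Dict.contains_iff_mem_keys _ _).1 (minroot_contains par h i hi)
  calc j = ((List.range j).map (fun i => (gstep par)^[i] x)).length := by simp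
    _ ≤ par.keys.length := (List.subperm_of_subset hnodL hsub).length_le

-- ---- walk lemmas ----

theorem walkA_sound (fam par : PySem.Dict String String)
    (h1 : ∀ x, par.get? x = if fam.getD x "" = "" then none else some (fam.getD x "")) :
    ∀ fuel x path, famWalkA fam fuel x path = true → GoodN par x := by
  intro fuel
  induction fuel with
  | zero => intro x path h; simp [famWalkA] at h
  | succ f ih =>
    intro x path h
    rw [famWalkA] at h
    by_cases hx : fam.getD x "" = ""
    · exact ⟨0, by rw [Function.iterate_zero_apply, h1 x, if_pos hx]⟩
    · have hsome : par.get? x = some (fam.getD x "") := by rw [h1 x, if_neg hx]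
      rw [if_neg (by simpa using hx)] at h
      by_cases hp : PySem.Set.contains path (fam.getD x "") = true
      · rw [if_pos (by simpa using hp)] at h; exact absurd h (by simp)
      · rw [if_neg (by simpa using hp)] at h
        exact good_step par x _ hsome (ih _ _ h)

theorem walkA_true (fam par : PySem.Dict String String)
    (h1 : ∀ x, par.get? x = if fam.getD x "" = "" then none else some (fam.getD x "")) :
    ∀ j fuel x path, MinRoot par x j → j + 1 ≤ fuel → (∀ q ∈ path, ReachN par q x) →
      famWalkA fam fuel x path = true := by
  intro j
  induction j with
  | zero =>
    intro fuel x path hmr hf hinv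
    obtain ⟨f, rfl⟩ : ∃ f, fuel = f + 1 := ⟨fuel - 1, by omega⟩
    have hx : fam.getD x "" = "" := by
      by_contra hne
      have h0 := hmr.1
      rw [Function.iterate_zero_apply, h1 x, if_neg hne] at h0
      cases h0
    rw [famWalkA, if_pos (by simpa using hx)]
  | succ j ih =>
    intro fuel x path hmr hf hinv
    obtain ⟨f, rfl⟩ : ∃ f, fuel = f + 1 := ⟨fuel - 1, by omega⟩
    have hne : par.get? x ≠ none := by simpa using hmr.2 0 (by omega)
    obtain ⟨p, hsome⟩ : ∃ p, par.get? x = some p := by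
      cases hg : par.get? x
      · exact absurd hg hne
      · exact ⟨_, rfl⟩
    have hgd : fam.getD x "" = p := by
      by_cases hxe : fam.getD x "" = ""
      · rw [h1 x, if_pos hxe] at hsome; cases hsome
      · rw [h1 x, if_neg hxe] at hsome; exact Option.some.inj hsome
    have hxe : ¬ (fam.getD x "" = "") := by
      intro hc; rw [h1 x, if_pos hc] at hsome; cases hsome
    rw [famWalkA, if_neg (by simpa using hxe), hgd]
    by_cases hp : PySem.Set.contains path p = true
    · exfalso
      have hmem : p ∈ path := (PySem.Set.contains_iff _ _).1 hp
      exact cycle_from_step par hsome (hinv p hmem) (minroot_good par hmr)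
    · rw [if_neg (by simpa using hp)]
      apply ih f p (PySem.Set.add path p) (minroot_shift par hmr hsome) (by omega)
      intro q hq
      rcases (PySem.Set.mem_add _ _ _).1 hq with hqp | rfl
      · exact reach_snoc par (hinv q hqp) hsome
      · exact reach_refl par q

theorem loopA_iff (fam par : PySem.Dict String String)
    (h1 : ∀ x, par.get? x = if fam.getD x "" = "" then none else some (fam.getD x ""))
    (hsz : par.keys.length ≤ fam.size) :
    ∀ ks, (famLoopA fam ks = true ↔ ∀ k ∈ ks, GoodN par k) := by
  intro ks
  induction ks with
  | nil => simp [famLoopA]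
  | cons k ks ih =>
    rw [famLoopA]
    cases hwc : famWalkA fam (fam.size + 1) k (PySem.Set.add PySem.Set.empty k) with
    | false =>
      have hk : ¬ GoodN par k := by
        intro hg
        obtain ⟨j, hmr⟩ := minroot_of_good par k hg
        have hle := minroot_le par k j hmr
        have hw : famWalkA fam (fam.size + 1) k (PySem.Set.add PySem.Set.empty k) = true := by
          apply walkA_true fam par h1 j (fam.size + 1) k _ hmr (by omega)
          intro q hq
          rcases (PySem.Set.mem_add _ _ _).1 hq with hq0 | rfl
          · exact absurd hq0 (List.not_mem_nil)
          · exact reach_refl par q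
        rw [hw] at hwc
        cases hwc
      simp only [Bool.false_eq_true, if_false, false_iff]
      intro hall
      exact hk (hall k List.mem_cons_self)
    | true =>
      have hk : GoodN par k := walkA_sound fam par h1 _ _ _ hwc
      rw [if_pos rfl]
      rw [ih]
      constructor
      · intro hall q hq
        rcases List.mem_cons.1 hq with rfl | hq'
        · exact hk
        · exact hall q hq'
      · intro hall q hq
        exact hall q (List.mem_cons_of_mem _ hq)

theorem walkB_none (par : PySem.Dict String String) :
    ∀ fuel x visited path, ¬ GoodN par x → (∀ v ∈ visited, GoodN par v) →
      (∀ q ∈ path, SReachN par q x) → path.Nodup → (∀ q ∈ path, q ∈ par.keys) →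
      par.keys.length + 1 ≤ fuel + path.length →
      famWalkB par fuel x visited path = none := by
  intro fuel
  induction fuel with
  | zero =>
    intro x visited path hbad hv hinv hnodup hsub hlen
    exfalso
    have := (List.subperm_of_subset hnodup (fun q hq => hsub q hq)).length_le
    omega
  | succ f ih =>
    intro x visited path hbad hv hinv hnodup hsub hlen
    rw [famWalkB]
    have hxv : PySem.Set.contains visited x = false := by
      cases hcv : PySem.Set.contains visited x
      · rfl
      · exact absurd (hv x ((PySem.Set.contains_iff _ _).1 hcv)) hbad
    rw [if_neg (fun hc => by rw [hxv] at hc; cases hc)]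
    by_cases hxp : PySem.Set.contains path x = true
    · rw [if_pos hxp]
    · rw [if_neg hxp]
      cases hgx : par.get? x with
      | none => exact absurd ⟨0, by simpa using hgx⟩ hbad
      | some p =>
        have hxnotp : x ∉ path := fun hc => hxp ((PySem.Set.contains_iff _ _).2 hc)
        apply ih
        · exact fun hgp => hbad (good_step par x p hgx hgp)
        · exact hv
        · intro q hq
          rcases (PySem.Set.mem_add _ _ _).1 hq with hqp | rfl
          · exact sreach_snoc par (hinv q hqp) hgx
          · exact sreach_step par hgx
        · exact PySem.Set.nodup_add _ _ hnodup
        · intro q hq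
          rcases (PySem.Set.mem_add _ _ _).1 hq with hqp | rfl
          · exact hsub q hqp
          · exact (PySem.Dict.contains_iff_mem_keys _ _).1
              (contains_of_get?_ne_none _ _ (by rw [hgx]; simp))
        · rw [PySem.Set.add_of_not_mem hxnotp, List.length_append]
          simp only [List.length_cons, List.length_nil]
          omega

theorem walkB_some (par : PySem.Dict String String) :
    ∀ j fuel x visited path, MinRoot par x j → j + 1 ≤ fuel →
      (∀ v ∈ visited, GoodN par v) → (∀ q ∈ path, SReachN par q x) →
      ∃ path', famWalkB par fuel x visited path = some path' ∧ ∀ q ∈ path', GoodN par q := by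
  intro j
  induction j with
  | zero =>
    intro fuel x visited path hmr hf hv hinv
    obtain ⟨f, rfl⟩ : ∃ f, fuel = f + 1 := ⟨fuel - 1, by omega⟩
    have hgoodx : GoodN par x := minroot_good par hmr
    rw [famWalkB]
    by_cases hxv : PySem.Set.contains visited x = true
    · exact ⟨path, by rw [if_pos hxv],
        fun q hq => good_of_sreach par (hinv q hq) hgoodx⟩
    · have hxp : PySem.Set.contains path x = false := by
        cases hcp : PySem.Set.contains path x
        · rfl
        · exact absurd hgoodx (not_good_of_sreach_self par (hinv x ((PySem.Set.contains_iff _ _).1 hcp)))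
      rw [if_neg hxv, if_neg (fun hc => by rw [hxp] at hc; cases hc)]
      have hgx : par.get? x = none := by simpa using hmr.1
      rw [hgx]
      refine ⟨PySem.Set.add path x, rfl, ?_⟩
      intro q hq
      rcases (PySem.Set.mem_add _ _ _).1 hq with hqp | rfl
      · exact good_of_sreach par (hinv q hqp) hgoodx
      · exact hgoodx
  | succ j ih =>
    intro fuel x visited path hmr hf hv hinv
    obtain ⟨f, rfl⟩ : ∃ f, fuel = f + 1 := ⟨fuel - 1, by omega⟩
    have hgoodx : GoodN par x := minroot_good par hmr
    rw [famWalkB]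
    by_cases hxv : PySem.Set.contains visited x = true
    · exact ⟨path, by rw [if_pos hxv],
        fun q hq => good_of_sreach par (hinv q hq) hgoodx⟩
    · have hxp : PySem.Set.contains path x = false := by
        cases hcp : PySem.Set.contains path x
        · rfl
        · exact absurd hgoodx (not_good_of_sreach_self par (hinv x ((PySem.Set.contains_iff _ _).1 hcp)))
      rw [if_neg hxv, if_neg (fun hc => by rw [hxp] at hc; cases hc)]
      have hne : par.get? x ≠ none := by simpa using hmr.2 0 (by omega)
      obtain ⟨p, hsome⟩ : ∃ p, par.get? x = some p := by
        cases hg : par.get? x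
        · exact absurd hg hne
        · exact ⟨_, rfl⟩
      rw [hsome]
      apply ih f p visited (PySem.Set.add path x) (minroot_shift par hmr hsome) (by omega) hv
      intro q hq
      rcases (PySem.Set.mem_add _ _ _).1 hq with hqp | rfl
      · exact sreach_snoc par (hinv q hqp) hsome
      · exact sreach_step par hsome

theorem loopB_iff (par : PySem.Dict String String) :
    ∀ ns visited, (∀ v ∈ visited, GoodN par v) →
      (famLoopB par ns visited = true ↔ ∀ n ∈ ns, GoodN par n) := by
  intro ns
  induction ns with
  | nil => intro visited _; simp [famLoopB]
  | cons n ns ih =>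
    intro visited hv
    rw [famLoopB]
    by_cases hn : GoodN par n
    · obtain ⟨j, hmr⟩ := minroot_of_good par n hn
      have hle := minroot_le par n j hmr
      have hsz : par.keys.length = par.size := (dict_size_eq_keys_length par).symm
      obtain ⟨path', heq, hgoods⟩ :=
        walkB_some par j (par.size + 2) n visited PySem.Set.empty hmr (by omega) hv
          (fun q hq => absurd hq (List.not_mem_nil))
      rw [heq]
      have hv' : ∀ v ∈ PySem.Set.union visited path', GoodN par v := by
        intro v hvm
        rcases (PySem.Set.mem_union _ _ _).1 hvm with h | h
        · exact hv v h
        · exact hgoods v h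
      simp [ih _ hv', hn]
    · have hsz : par.keys.length = par.size := (dict_size_eq_keys_length par).symm
      have heq := walkB_none par (par.size + 2) n visited PySem.Set.empty hn hv
        (fun q hq => absurd hq (List.not_mem_nil)) List.nodup_nil
        (fun q hq => absurd hq (List.not_mem_nil)) (by simp; omega)
      rw [heq]
      simp [hn]

-- ---- root-count and final assembly ----

theorem count_eq (fam par : PySem.Dict String String) (nodes : PySem.Set String)
    (hrel : DRel fam par nodes) :
    (fam.values.map (fun v => if v == "" then (1 : Nat) else 0)).count 1
      = (nodes.filter (fun n => !par.contains n)).length := by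
  obtain ⟨h1, h2, h3, h4, _⟩ := hrel
  have s1 : (fam.values.map (fun v => if v == "" then (1 : Nat) else 0)).count 1
      = fam.values.countP (fun v => v == "") := by
    rw [List.count_eq_countP, List.countP_map]
    apply List.countP_congr
    intro v _
    by_cases hv : v = "" <;> simp [hv]
  have s2 : fam.values.countP (fun v => v == "")
      = fam.keys.countP (fun k => fam.getD k "" == "") := by
    simp only [PySem.Dict.values, PySem.Dict.keys, List.countP_map]
    apply List.countP_congr
    intro kv hkv
    have hget : fam.getD kv.1 "" = kv.2 :=
      PySem.Dict.getD_of_mem_items _ (by exact hkv) h4 ""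
    simp [Function.comp, hget]
  have s3 : fam.keys.countP (fun k => fam.getD k "" == "")
      = nodes.countP (fun k => fam.getD k "" == "") :=
    List.Perm.countP_eq _ ((List.perm_ext_iff_of_nodup h4 h3).2 h2)
  have s4 : nodes.countP (fun k => fam.getD k "" == "")
      = nodes.countP (fun n => !par.contains n) := by
    apply List.countP_congr
    intro n _
    by_cases hn : fam.getD n "" = ""
    · have : par.get? n = none := by rw [h1 n, if_pos hn]
      simp [hn, PySem.Dict.contains_eq_isSome_get?, this]
    · have : par.get? n = some (fam.getD n "") := by rw [h1 n, if_neg hn]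
      simp [hn, PySem.Dict.contains_eq_isSome_get?, this]
  rw [s1, s2, s3, s4, List.countP_eq_length_filter]

theorem main_eq (tree : List (List String)) (hpre : Pre_is_family tree) :
    is_family tree = is_family_alt tree := by
  have hpre' : ∀ m ∈ tree, preMember m = true := by
    simpa [Pre_is_family, List.all_eq_true] using hpre
  have hrel := build_rel tree PySem.Dict.empty PySem.Dict.empty PySem.Set.empty drel_init hpre'
  unfold is_family is_family_alt
  cases hA : famBuildA tree PySem.Dict.empty with
  | none =>
    cases hB : famBuildB tree PySem.Dict.empty PySem.Set.empty with
    | none => rfl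
    | some pn => rw [hA, hB] at hrel; exact absurd hrel (by simp [ORel])
  | some fam =>
    cases hB : famBuildB tree PySem.Dict.empty PySem.Set.empty with
    | none => rw [hA, hB] at hrel; exact absurd hrel (by simp [ORel])
    | some pn =>
      rw [hA, hB] at hrel
      obtain ⟨par, nodes⟩ := pn
      have hdrel : DRel fam par nodes := hrel
      have hcnt := count_eq fam par nodes hdrel
      dsimp only
      rw [hcnt]
      by_cases hnum : (nodes.filter (fun n => !par.contains n)).length = 1
      · rw [if_neg (by omega), if_neg (by omega)]
        -- the two cycle loops agree
        have h1 := hdrel.1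
        have h4 := hdrel.2.2.2.1
        have hsub : par.keys ⊆ fam.keys := by
          intro x hx
          have hcx : par.get? x ≠ none := by
            intro hc
            rw [PySem.Dict.get?_eq_none_iff_not_mem_keys] at hc
            exact hc hx
          have : ¬ (fam.getD x "" = "") := by
            intro hc
            rw [h1 x, if_pos hc] at hcx
            exact hcx rfl
          rcases hfx : fam.get? x with _ | v
          · exact absurd (PySem.Dict.getD_of_get?_eq_none _ _ hfx) this
          · exact ((PySem.Dict.contains_iff_mem_keys _ _).1
              (contains_of_get?_ne_none _ _ (by rw [hfx]; simp)))
        have hsz : par.keys.length ≤ fam.size := by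
          rw [dict_size_eq_keys_length]
          exact (List.subperm_of_subset hdrel.2.2.2.2 hsub).length_le
        have hiff : (∀ k ∈ fam.keys, GoodN par k) ↔ (∀ k ∈ par.keys, GoodN par k) := by
          constructor
          · exact fun h k hk => h k (hsub hk)
          · intro h k _
            by_cases hkp : k ∈ par.keys
            · exact h k hkp
            · exact ⟨0, by rw [Function.iterate_zero_apply,
                PySem.Dict.get?_eq_none_iff_not_mem_keys]; exact hkp⟩
        have hAiff := loopA_iff fam par h1 hsz fam.keys
        have hBiff := loopB_iff par par.keys PySem.Set.empty
          (fun v hv => absurd hv (List.not_mem_nil))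
        cases hb : famLoopB par par.keys PySem.Set.empty with
        | true => exact hAiff.2 (hiff.2 (hBiff.1 hb))
        | false =>
          cases ha : famLoopA fam fam.keys with
          | true =>
            rw [hBiff.2 (hiff.1 (hAiff.1 ha))] at hb
            cases hb
          | false => rfl
      · rw [if_pos (by omega), if_pos (by omega)]

-- ===== VERDICT (by name: the statement is the Claim_ definition above) =====
theorem is_family_spec : Claim_equal_is_family := by
  intro tree _ hpre
  unfold Spec_is_family
  exact main_eq tree hpre
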